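-- pv_equiv track=rewrite | github.com/SeunghyoKu/Algorithms | Programmers/Level1/3진법뒤집기.py | solution
-- ===== SOURCE A (Python) =====
-- def solution(n):
--     answer = 0
--     cnt = 1
--     a = ''
--     while n>0:
--         a+=str(n%3)
--         n = n//3
--     for b in range(len(a),0,-1):
--         answer += (int(a[b-1])*cnt)
--         cnt *= 3
--     return answer
-- ===== SOURCE B (Python) =====
-- def solution(n):
--     answer = 0
--     while n > 0:
--         answer = answer * 3 + n % 3
--         n //= 3
--     return answer
-- ===== Notes on version B (the rewrite author's own statement) =====
-- stated objective: simpler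
-- what changed: Single-pass Horner accumulation (answer = answer*3 + n%3) replaces A's two passes that build a base-3 digit string and then reconstruct the reversed number with an explicit power counter.
import Mathlib
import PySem

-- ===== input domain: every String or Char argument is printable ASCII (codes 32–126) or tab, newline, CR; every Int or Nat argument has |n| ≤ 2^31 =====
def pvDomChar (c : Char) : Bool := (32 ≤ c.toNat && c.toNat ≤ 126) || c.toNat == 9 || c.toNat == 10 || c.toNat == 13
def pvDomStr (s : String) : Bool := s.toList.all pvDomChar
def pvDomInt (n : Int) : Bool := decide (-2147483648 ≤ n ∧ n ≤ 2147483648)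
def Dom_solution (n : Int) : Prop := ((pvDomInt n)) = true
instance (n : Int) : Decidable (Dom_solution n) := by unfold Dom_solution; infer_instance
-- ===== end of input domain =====

-- B replaces A's two passes (build the base-3 digit string, then reconstruct the reversed
-- number with a power counter) by one Horner accumulation; return values are equal for all ints.

-- ===== PORT A =====
-- the 'while n>0' loop: a += str(n%3); n = n//3
def solutionLoop1 (n : Int) (a : List Char) : List Char :=
  if _h : 0 < n then
    solutionLoop1 (PySem.Int.floordiv n 3) (a ++ PySem.Int.toChars (PySem.Int.mod n 3))
  else a
termination_by n.toNat
decreasing_by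
  have := PySem.Int.floordiv_eq_ediv_of_pos (a := n) (b := 3) (by omega)
  omega

def solution (n : Int) : Int :=
  let a := solutionLoop1 n []
  -- for b in range(len(a),0,-1): answer += int(a[b-1])*cnt; cnt *= 3
  -- the index b-1 is always in range and a[b-1] is always a digit char,
  -- so pyGetD / ofChars?.getD never take their (unreachable) defaults
  let p := (PySem.List.pyRange (a.length : Int) 0 (-1)).foldl
    (fun (p : Int × Int) b =>
      (p.1 + ((PySem.Int.ofChars? [PySem.List.pyGetD a (b - 1) '0']).getD 0) * p.2, p.2 * 3))
    (0, 1)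
  p.1

-- ===== PORT B =====
-- while n>0: answer = answer*3 + n%3; n //= 3
def solutionAltLoop (n : Int) (answer : Int) : Int :=
  if _h : 0 < n then
    solutionAltLoop (PySem.Int.floordiv n 3) (answer * 3 + PySem.Int.mod n 3)
  else answer
termination_by n.toNat
decreasing_by
  have := PySem.Int.floordiv_eq_ediv_of_pos (a := n) (b := 3) (by omega)
  omega

def solution_alt (n : Int) : Int := solutionAltLoop n 0

-- ===== PRECONDITION & SPEC =====
def Spec_solution (n : Int) (out : Int) : Prop := out = solution_alt n
instance (n : Int) (out : Int) : Decidable (Spec_solution n out) := by unfold Spec_solution; infer_instance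

-- ===== CLAIM (what is proved, stated in full; the proofs are below) =====
def Claim_equal_solution : Prop := ∀ (n : Int), Dom_solution n → Spec_solution n (solution n)

-- ===== LEMMAS AND PROOFS =====

-- proof-only abstraction: the base-3 digits of n, least significant first
def digs (n : Int) : List Int :=
  if _h : 0 < n then PySem.Int.mod n 3 :: digs (PySem.Int.floordiv n 3) else []
termination_by n.toNat
decreasing_by
  have := PySem.Int.floordiv_eq_ediv_of_pos (a := n) (b := 3) (by omega)
  omega

def chr3 (d : Int) : Char := Char.ofNat (48 + d.toNat)

lemma mod3_bounds (n : Int) : 0 ≤ PySem.Int.mod n 3 ∧ PySem.Int.mod n 3 < 3 := by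
  rw [PySem.Int.mod_eq_emod_of_pos (by omega)]; omega

lemma toChars_digit (d : Int) (h0 : 0 ≤ d) (h3 : d < 3) :
    PySem.Int.toChars d = [chr3 d] := by
  interval_cases d <;> decide

lemma loop1_eq (n : Int) (a : List Char) : solutionLoop1 n a = a ++ (digs n).map chr3 := by
  induction n, a using solutionLoop1.induct with
  | case1 n a h ih =>
      rw [solutionLoop1, dif_pos h, ih]
      conv_rhs => rw [digs, dif_pos h]
      obtain ⟨h0, h3⟩ := mod3_bounds n
      rw [toChars_digit _ h0 h3]
      simp
  | case2 n a h =>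
      rw [solutionLoop1, dif_neg h, digs, dif_neg h]
      simp

def horner (acc : Int) (ds : List Int) : Int := ds.foldl (fun r d => r * 3 + d) acc

lemma horner_shift (ds : List Int) : ∀ acc, horner acc ds = acc * 3 ^ ds.length + horner 0 ds := by
  induction ds with
  | nil => intro acc; simp [horner]
  | cons d t ih =>
      intro acc
      simp only [horner, List.foldl_cons, List.length_cons] at *
      rw [ih (acc * 3 + d), ih (0 * 3 + d)]; ring

def step2 (p : Int × Int) (c : Char) : Int × Int :=
  (p.1 + ((PySem.Int.ofChars? [c]).getD 0) * p.2, p.2 * 3)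

lemma ofChars_chr3 (d : Int) (h0 : 0 ≤ d) (h3 : d < 3) :
    (PySem.Int.ofChars? [chr3 d]).getD 0 = d := by
  interval_cases d <;> decide

-- the downward-counting second loop of A, over any char list, reads the list back to front
lemma loop2_eq (a : List Char) : ∀ ans cnt : Int,
    (PySem.List.pyRange (a.length : Int) 0 (-1)).foldl
      (fun (p : Int × Int) b =>
        (p.1 + ((PySem.Int.ofChars? [PySem.List.pyGetD a (b - 1) '0']).getD 0) * p.2, p.2 * 3))
      (ans, cnt)
    = a.reverse.foldl step2 (ans, cnt) := by
  induction a using List.reverseRecOn with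
  | nil => intro ans cnt; simp [PySem.List.pyRange_neg_one_eq_nil]
  | append_singleton xs x ih =>
      intro ans cnt
      have hlen : ((xs ++ [x]).length : Int) = (xs.length : Int) + 1 := by simp
      rw [hlen, PySem.List.pyRange_neg_one_cons (by positivity), List.foldl_cons]
      have hget : PySem.List.pyGetD (xs ++ [x]) ((xs.length : Int) + 1 - 1) '0' = x := by
        have : (xs.length : Int) + 1 - 1 = ((xs.length : Nat) : Int) := by omega
        rw [this, PySem.List.pyGetD_natCast]
        simp
      rw [hget]
      simp only [show ((xs.length : Int) + 1 - 1) = ((xs.length : Nat) : Int) from by ring]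
      have hcongr :
          (PySem.List.pyRange (xs.length : Int) 0 (-1)).foldl
            (fun (p : Int × Int) b =>
              (p.1 + ((PySem.Int.ofChars? [PySem.List.pyGetD (xs ++ [x]) (b - 1) '0']).getD 0) * p.2, p.2 * 3))
            (ans + ((PySem.Int.ofChars? [x]).getD 0) * cnt, cnt * 3)
          = (PySem.List.pyRange (xs.length : Int) 0 (-1)).foldl
            (fun (p : Int × Int) b =>
              (p.1 + ((PySem.Int.ofChars? [PySem.List.pyGetD xs (b - 1) '0']).getD 0) * p.2, p.2 * 3))
            (ans + ((PySem.Int.ofChars? [x]).getD 0) * cnt, cnt * 3) := by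
        apply PySem.List.foldl_congr_mem
        intro p b hb
        have hb' := (PySem.List.mem_pyRange_neg_one).1 hb
        have h1 : 0 ≤ b - 1 := by omega
        have h2 : b - 1 < ((xs.length : Nat) : Int) := by omega
        have h2' : b - 1 < (((xs ++ [x]).length : Nat) : Int) := by simp; omega
        rw [PySem.List.pyGetD_eq_getElem _ _ h1 h2', PySem.List.pyGetD_eq_getElem _ _ h1 h2]
        congr 1
        rw [List.getElem_append_left]
      rw [hcongr, ih]
      simp [step2]

-- the back-to-front weighted sum equals Horner evaluation front to back
lemma revfold_horner (ds : List Int) (hd : ∀ d ∈ ds, 0 ≤ d ∧ d < 3) : ∀ ans cnt : Int,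
    (ds.map chr3).reverse.foldl step2 (ans, cnt) = (ans + cnt * horner 0 ds, cnt * 3 ^ ds.length) := by
  induction ds with
  | nil => intro ans cnt; simp [horner]
  | cons d t ih =>
      intro ans cnt
      have hdt : ∀ x ∈ t, 0 ≤ x ∧ x < 3 := fun x hx => hd x (List.mem_cons_of_mem _ hx)
      obtain ⟨h0, h3⟩ := hd d (List.mem_cons_self ..)
      simp only [List.map_cons, List.reverse_cons, List.foldl_append, List.foldl_cons,
        List.foldl_nil, ih hdt]
      simp only [step2, ofChars_chr3 d h0 h3]
      rw [Prod.mk.injEq]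
      refine ⟨?_, ?_⟩
      · have : horner 0 (d :: t) = d * 3 ^ t.length + horner 0 t := by
          simp only [horner, List.foldl_cons]
          have := horner_shift t d
          simp only [horner] at this
          rw [show (0:Int) * 3 + d = d by ring, this]
        rw [this]; ring
      · rw [List.length_cons, pow_succ]; ring

lemma altLoop_eq (n : Int) (acc : Int) : solutionAltLoop n acc = horner acc (digs n) := by
  induction n, acc using solutionAltLoop.induct with
  | case1 n acc h ih =>
      rw [solutionAltLoop, dif_pos h, digs, dif_pos h, ih]
      simp [horner]
  | case2 n acc h =>
      rw [solutionAltLoop, dif_neg h, digs, dif_neg h]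
      simp [horner]

lemma digs_bounds (n : Int) : ∀ d ∈ digs n, 0 ≤ d ∧ d < 3 := by
  induction n using digs.induct with
  | case1 n h ih =>
      rw [digs, dif_pos h]
      intro d hd
      rcases List.mem_cons.1 hd with h' | h'
      · subst h'; exact mod3_bounds n
      · exact ih d h'
  | case2 n h =>
      rw [digs, dif_neg h]; intro d hd; simp at hd

-- ===== VERDICT (by name: the statement is the Claim_ definition above) =====
theorem solution_spec : Claim_equal_solution := by
  intro n _
  show solution n = solution_alt n
  unfold solution solution_alt
  rw [loop1_eq n []]
  simp only [List.nil_append]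
  rw [show ((digs n).map chr3).length = (digs n).length by simp]
  have h2 := loop2_eq ((digs n).map chr3) 0 1
  rw [show (((digs n).map chr3).length : Int) = (((digs n).length : Nat) : Int) by simp] at h2
  rw [h2, revfold_horner (digs n) (digs_bounds n) 0 1, altLoop_eq n 0]
  simp
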